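-- pv_equiv track=rewrite | github.com/lgraham076/DeviceDisassemblyVisualizer | hexreader.py | formathexvalues
-- ===== SOURCE A (Python) =====
-- HEXLINELIMIT=16
--
-- def gethexaddress(intnum):
--             hexaddress=hex(intnum*HEXLINELIMIT)
--             hexaddress=hexaddress.replace('0x','')
--             if(len(str(hexaddress)) < 8):
--                 diff=8-len(str(hexaddress))
--                 while(diff > 0):
--                     hexaddress='0'+hexaddress
--                     diff-=1
--             return hexaddress
--
-- def formathexvalues(hexvalues):
--     hexlines=[]
--     asciivals=[]
--     hexline=''
--     hexcount=0
--     addresscount=0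
--
--     for value in hexvalues:
--         hexline += value[0]
--         asciivals.append(value[1])
--         hexcount += 1
--         #Limit the number of hex values to the specified limit and start new line
--         if(hexcount == HEXLINELIMIT):
--             #Add hexaddress
--             hexline=gethexaddress(addresscount)+' | '+hexline+' | '
--
--             for asciival in asciivals:
--                 if ord(asciival) == 0:
--                     hexline = hexline + '..'
--                 else:
--                     hexline = hexline + asciival
--
--             hexlines.append(hexline)
--             hexline=''
--             hexcount=0
--             addresscount+=1
--             asciivals=[]
--         else:
--             hexline += ' '
--     #Append any remaining values to list
--     if(hexcount!=0):
--         hexline=gethexaddress(addresscount)+' | '+hexline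
--         hexline=hexline[:-1]#Remove space if incomplete line
--         hexlines.append(hexline)
--
--     return hexlines
-- ===== SOURCE B (Python) =====
-- HEXLINELIMIT = 16
--
--
-- def gethexaddress(intnum):
--     hexaddress = hex(intnum * HEXLINELIMIT)
--     hexaddress = hexaddress.replace('0x', '')
--     if len(str(hexaddress)) < 8:
--         diff = 8 - len(str(hexaddress))
--         while diff > 0:
--             hexaddress = '0' + hexaddress
--             diff -= 1
--     return hexaddress
--
--
-- def formathexvalues(hexvalues):
--     # Chunk-first decomposition: peel off blocks of 16 and format each whole.
--     lines = []
--     rest = hexvalues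
--     address = 0
--     while rest:
--         chunk, rest = rest[:HEXLINELIMIT], rest[HEXLINELIMIT:]
--         line = gethexaddress(address) + ' | ' + ' '.join(v[0] for v in chunk)
--         if len(chunk) == HEXLINELIMIT:
--             line += ' | ' + ''.join(
--                 '..' if ord(v[1]) == 0 else v[1] for v in chunk)
--         lines.append(line)
--         address += 1
--     return lines
-- ===== Notes on version B (the rewrite author's own statement) =====
-- stated objective: simpler
-- what changed: B chunks the input into blocks of 16 up front and formats each block in one go with str.join, instead of A's per-character accumulation of a running line with counters, a pending ascii list and a trailing-space fixup.
import Mathlib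
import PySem

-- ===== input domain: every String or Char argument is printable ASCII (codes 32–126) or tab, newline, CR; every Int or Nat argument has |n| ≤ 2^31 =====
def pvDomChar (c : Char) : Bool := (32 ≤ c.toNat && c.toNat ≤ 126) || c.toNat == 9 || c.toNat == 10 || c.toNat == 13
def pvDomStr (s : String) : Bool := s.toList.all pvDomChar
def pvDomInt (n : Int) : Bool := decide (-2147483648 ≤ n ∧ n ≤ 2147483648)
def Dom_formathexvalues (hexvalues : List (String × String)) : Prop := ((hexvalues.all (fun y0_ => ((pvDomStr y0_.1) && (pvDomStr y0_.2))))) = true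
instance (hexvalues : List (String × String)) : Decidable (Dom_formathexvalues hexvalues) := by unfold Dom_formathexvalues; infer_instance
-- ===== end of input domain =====

-- B formats each 16-block in one go (chunk-first) instead of A's per-element accumulation; same O(n), simpler decomposition. Strings are handled as List Char (wrapped with String.ofList only when a finished line is stored), exactly as PYSEM.md advises.

-- hex(n) for n ≥ 0 (all call sites pass intnum*16 with intnum ≥ 0), without the '0x'
-- prefix A strips right away: lowercase hex digits, '0' for 0. Exact on that domain.
def pvHexDigitChar (n : Nat) : Char := if n < 10 then Char.ofNat (48 + n) else Char.ofNat (87 + n)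

def pvHexChars (n : Nat) : List Char :=
  if n < 16 then [pvHexDigitChar n]
  else pvHexChars (n / 16) ++ [pvHexDigitChar (n % 16)]
decreasing_by exact Nat.div_lt_self (by omega) (by omega)

-- the while-loop of gethexaddress: prepend '0' diff times
def pvPadZeros : Nat → List Char → List Char
  | 0, s => s
  | d + 1, s => pvPadZeros d ('0' :: s)

-- shared module-level helper (both Pythons define it verbatim)
def gethexaddress (intnum : Int) : List Char :=
  let h := pvHexChars (intnum * 16).toNat
  if h.length < 8 then pvPadZeros (8 - h.length) h else h

-- ord(s): value of Python's ord for len-1 strings; 0 stands where Python RAISES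
-- (len ≠ 1) — those inputs are excluded by Pre_formathexvalues, identically in both ports.
def pvOrd (s : String) : Nat :=
  match s.toList with
  | [c] => c.toNat
  | _ => 0

def pvBarSep : List Char := [' ', '|', ' ']

-- ===== PORT A =====
structure StA where
  hexlines : List String
  asciivals : List String
  hexline : List Char
  hexcount : Int
  addresscount : Int

def stepA (st : StA) (value : String × String) : StA :=
  let hexline := st.hexline ++ value.1.toList
  let asciivals := st.asciivals ++ [value.2]
  let hexcount := st.hexcount + 1
  if hexcount == 16 then
    let hexline := gethexaddress st.addresscount ++ pvBarSep ++ hexline ++ pvBarSep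
    let hexline := asciivals.foldl
      (fun hl a => if pvOrd a == 0 then hl ++ ['.', '.'] else hl ++ a.toList) hexline
    { hexlines := st.hexlines ++ [String.ofList hexline], asciivals := [],
      hexline := [], hexcount := 0, addresscount := st.addresscount + 1 }
  else
    { st with asciivals := asciivals, hexline := hexline ++ [' '], hexcount := hexcount }

def formathexvalues (hexvalues : List (String × String)) : List String :=
  let st := hexvalues.foldl stepA ⟨[], [], [], 0, 0⟩
  if st.hexcount ≠ 0 then
    -- hexline[:-1] removes the trailing space of the incomplete line
    st.hexlines ++ [String.ofList (PySem.List.slice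
      (gethexaddress st.addresscount ++ pvBarSep ++ st.hexline) none (some (-1)))]
  else
    st.hexlines

-- ===== PORT B =====
def fmtChunkB (chunk : List (String × String)) (address : Int) : List Char :=
  let line := gethexaddress address ++ pvBarSep ++
    PySem.Chars.join [' '] (chunk.map (fun v => v.1.toList))
  if chunk.length == 16 then
    line ++ pvBarSep ++
      (chunk.map (fun v => if pvOrd v.2 == 0 then ['.', '.'] else v.2.toList)).flatten
  else
    line

def goB (xs : List (String × String)) (address : Int) : List String :=
  if h : xs = [] then []
  else
    String.ofList (fmtChunkB (xs.take 16) address) :: goB (xs.drop 16) (address + 1)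
termination_by xs.length
decreasing_by
  have := List.length_pos_of_ne_nil h
  simp [List.length_drop]; omega

def formathexvalues_alt (hexvalues : List (String × String)) : List String :=
  goB hexvalues 0

-- ===== PRECONDITION & SPEC =====
-- Pre_ excludes exactly the inputs on which the Python raises TypeError: an element of a
-- FULL 16-block whose ascii component is not a single character (ord there raises).
def Pre_formathexvalues (hexvalues : List (String × String)) : Prop :=
  ∀ v ∈ hexvalues.take (16 * (hexvalues.length / 16)), v.2.toList.length = 1
instance (hexvalues : List (String × String)) : Decidable (Pre_formathexvalues hexvalues) := by unfold Pre_formathexvalues; infer_instance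

def pvWitness_formathexvalues : (List (String × String)) := [("4a", "J"), ("00", " ")]

def Spec_formathexvalues (hexvalues : List (String × String)) (out : List String) : Prop := out = formathexvalues_alt hexvalues
instance (hexvalues : List (String × String)) (out : List String) : Decidable (Spec_formathexvalues hexvalues out) := by unfold Spec_formathexvalues; infer_instance

-- ===== CLAIM (what is proved, stated in full; the proofs are below) =====
def Claim_equal_formathexvalues : Prop := ∀ (hexvalues : List (String × String)), Dom_formathexvalues hexvalues → Pre_formathexvalues hexvalues → Spec_formathexvalues hexvalues (formathexvalues hexvalues)

-- ===== LEMMAS AND PROOFS =====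

-- A's running hexline after the elements `pending` of an unfinished block
def pendHex (pending : List (String × String)) : List Char :=
  (pending.map (fun v => v.1.toList ++ [' '])).flatten

theorem join_cons_of_ne_nil (a : List Char) (l : List (List Char)) (h : l ≠ []) :
    PySem.Chars.join [' '] (a :: l) = a ++ [' '] ++ PySem.Chars.join [' '] l := by
  cases l with
  | nil => exact absurd rfl h
  | cons b t => rw [PySem.Chars.join_cons_cons]

theorem pendHex_append_last (pending : List (String × String)) (x : List Char) :
    pendHex pending ++ x = PySem.Chars.join [' '] (pending.map (fun v => v.1.toList) ++ [x]) := by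
  induction pending with
  | nil => simp [pendHex, PySem.Chars.join_singleton]
  | cons a t ih =>
      rw [List.map_cons, List.cons_append,
        join_cons_of_ne_nil _ _ (by simp), ← ih]
      simp [pendHex]

theorem pendHex_ne_nil (pending : List (String × String)) (h : pending ≠ []) :
    pendHex pending ≠ [] := by
  cases pending with
  | nil => exact absurd rfl h
  | cons a t => simp [pendHex]

theorem dropLast_pendHex (pending : List (String × String)) (h : pending ≠ []) :
    (pendHex pending).dropLast = PySem.Chars.join [' '] (pending.map (fun v => v.1.toList)) := by
  induction pending with
  | nil => exact absurd rfl h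
  | cons a t ih =>
      cases t with
      | nil => simp [pendHex, PySem.Chars.join_singleton]
      | cons b u =>
          have hne : pendHex (b :: u) ≠ [] := pendHex_ne_nil _ (by simp)
          have : pendHex (a :: b :: u) = (a.1.toList ++ [' ']) ++ pendHex (b :: u) := by
            simp [pendHex]
          rw [this, List.dropLast_append_of_ne_nil hne, ih (by simp)]
          exact (join_cons_of_ne_nil _ _ (by simp)).symm

-- the tail of port A, abstracted over an arbitrary starting state
def runA (st : StA) (xs : List (String × String)) : List String :=
  let st' := xs.foldl stepA st
  if st'.hexcount ≠ 0 then
    st'.hexlines ++ [String.ofList (PySem.List.slice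
      (gethexaddress st'.addresscount ++ pvBarSep ++ st'.hexline) none (some (-1)))]
  else
    st'.hexlines

theorem goB_nil (address : Int) : goB [] address = [] := by
  rw [goB]; simp

theorem goB_cons (xs : List (String × String)) (address : Int) (h : xs ≠ []) :
    goB xs address
      = String.ofList (fmtChunkB (xs.take 16) address) :: goB (xs.drop 16) (address + 1) := by
  rw [goB]; simp [h]

-- the ascii inner loop of A appends the rendered ascii of each pending value
theorem ascii_fold (l : List String) (init : List Char) :
    l.foldl (fun hl a => if pvOrd a == 0 then hl ++ ['.', '.'] else hl ++ a.toList) init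
      = init ++ (l.map (fun a => if pvOrd a == 0 then ['.', '.'] else a.toList)).flatten := by
  have hbody : (fun (hl : List Char) (a : String) =>
      if pvOrd a == 0 then hl ++ ['.', '.'] else hl ++ a.toList)
      = (fun hl a => hl ++ (if pvOrd a == 0 then ['.', '.'] else a.toList)) := by
    funext hl a; split_ifs <;> rfl
  rw [hbody, PySem.List.foldl_append_eq_flatMap]
  simp [List.flatMap_def]

theorem loop_invariant (xs : List (String × String)) :
    ∀ (pending : List (String × String)) (lines : List String) (address : Int),
      pending.length < 16 →
      runA ⟨lines, pending.map (fun v => v.2), pendHex pending, (pending.length : Int), address⟩ xs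
        = lines ++ goB (pending ++ xs) address := by
  induction xs with
  | nil =>
      intro pending lines address hlen
      cases pending with
      | nil => simp [runA, goB_nil]
      | cons p t =>
          rw [runA]
          simp only [List.foldl_nil, List.append_nil]
          split_ifs with h
          · have h16 : (((p :: t).length == 16)) = false := by
              simp only [beq_eq_false_iff_ne]; omega
            rw [goB_cons _ _ (by simp),
              List.take_of_length_le (le_of_lt hlen), List.drop_eq_nil_of_le (le_of_lt hlen),
              goB_nil, PySem.List.slice_to_neg_one,
              List.dropLast_append_of_ne_nil (pendHex_ne_nil _ (by simp)),
              dropLast_pendHex _ (by simp),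
              show fmtChunkB (p :: t) address = gethexaddress address ++ pvBarSep ++
                PySem.Chars.join [' '] ((p :: t).map (fun v => v.1.toList)) by
                  simp only [fmtChunkB, h16, Bool.false_eq_true, if_false]]
          · exfalso; apply h; simp only [List.length_cons]; push_cast; omega
  | cons v xs ih =>
      intro pending lines address hlen
      by_cases hfull : pending.length = 15
      · -- the 16th element: A flushes a full line, which is B's full chunk pending ++ [v]
        have h16 : (((pending ++ [v]).length == 16)) = true := by simp [hfull]
        have hline :
            ((pending.map (fun v => v.2)) ++ [v.2]).foldl
              (fun hl a => if pvOrd a == 0 then hl ++ ['.', '.'] else hl ++ a.toList)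
              (gethexaddress address ++ pvBarSep ++ (pendHex pending ++ v.1.toList) ++ pvBarSep)
            = fmtChunkB (pending ++ [v]) address := by
          rw [ascii_fold, fmtChunkB]
          simp only [h16]
          rw [pendHex_append_last]
          simp [List.append_assoc, Function.comp_def]
        have hstep :
            stepA ⟨lines, pending.map (fun v => v.2), pendHex pending, (pending.length : Int), address⟩ v
              = ⟨lines ++ [String.ofList (fmtChunkB (pending ++ [v]) address)], [], [], 0, address + 1⟩ := by
          rw [stepA]
          have hc : ((((pending.length : Int)) + 1 == 16)) = true := by simp [hfull]
          simp only [hc, hline]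
          simp
        rw [runA, List.foldl_cons, hstep, ← runA]
        have hIH := ih [] (lines ++ [String.ofList (fmtChunkB (pending ++ [v]) address)]) (address + 1) (by simp)
        simp only [pendHex, List.map_nil, List.flatten_nil, List.length_nil, Nat.cast_zero,
          List.nil_append] at hIH
        have hne2 : (pending ++ [v]) ++ xs ≠ [] := by
          intro hc; have := congrArg List.length hc; simp at this
        have hgo : goB ((pending ++ [v]) ++ xs) address
            = String.ofList (fmtChunkB (pending ++ [v]) address) :: goB xs (address + 1) := by
          rw [goB_cons _ _ hne2,
            List.take_left' (by simp [hfull]), List.drop_left' (by simp [hfull])]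
        rw [hIH, show pending ++ v :: xs = (pending ++ [v]) ++ xs by simp, hgo]
        simp
      · -- block not yet full: v joins pending
        have hstep :
            stepA ⟨lines, pending.map (fun v => v.2), pendHex pending, (pending.length : Int), address⟩ v
              = ⟨lines, (pending ++ [v]).map (fun v => v.2), pendHex (pending ++ [v]),
                  ((pending ++ [v]).length : Int), address⟩ := by
          rw [stepA]
          have hc : ((((pending.length : Int)) + 1 == 16)) = false := by simp; omega
          simp only [hc, Bool.false_eq_true, if_false]
          simp [pendHex]
        rw [runA, List.foldl_cons, hstep, ← runA,
          ih (pending ++ [v]) lines address (by simp; omega)]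
        simp

-- ===== VERDICT (by name: the statement is the Claim_ definition above) =====
theorem formathexvalues_spec : Claim_equal_formathexvalues := by
  intro hexvalues _hdom _hpre
  unfold Spec_formathexvalues
  have h := loop_invariant hexvalues [] [] 0 (by simp)
  simp only [pendHex, List.map_nil, List.flatten_nil, List.length_nil, Nat.cast_zero,
    List.nil_append] at h
  rw [formathexvalues, formathexvalues_alt, ← runA, h]
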